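-- pv_equiv track=rewrite | github.com/cy-hwang/programmers_coding_test | python/Level 1/q7.py | solution
-- ===== SOURCE A (Python) =====
-- def solution(n, lost, reserve):
--     """t"""
--     # 전체 학생
--     gym_suit_list = [1] * n
--
--     # 체육복 잃어버린 학생 제외
--     for val in lost:
--         gym_suit_list[val - 1] -= 1
--
--     # 여벌 체육복 고려
--     for val in reserve:
--         gym_suit_list[val - 1] += 1
--
--     # 앞에서부터 순환
--     for key, val in enumerate(gym_suit_list):
--         if val == 2:
--             if key == 0:
--                 borrow_gym_suit(gym_suit_list, 1, key)
--
--             elif key == len(gym_suit_list) - 1: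
--                 borrow_gym_suit(gym_suit_list, -1, key)
--             else:
--                 # 왼쪽에 안 빌려줬으면 오른쪽도 확인하라
--                 if not borrow_gym_suit(gym_suit_list, -1, key):
--                     borrow_gym_suit(gym_suit_list, 1, key)
--
--     answer = gym_suit_list.count(1) + gym_suit_list.count(2)
--     return answer
--
-- def borrow_gym_suit(instance: list, receiver: int, donator: int):
--     """보유하고 있는 체육복이 없다면 빌린다"""
--     if instance[donator + receiver] == 0:
--         instance[donator + receiver] += 1
--         instance[donator] -= 1
--         return True
--     return False
-- ===== SOURCE B (Python) =====
-- def solution(n, lost, reserve):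
--     """t"""
--     suits = [1] * n
--     for v in lost:
--         suits[v - 1] -= 1
--     for v in reserve:
--         suits[v - 1] += 1
--
--     # One streaming pass: a spare suit first rescues the previous student,
--     # otherwise the next one; only O(1) state is kept and nothing is mutated.
--     attend = 0
--     prev = 0        # suit count of the previous student after any lending
--     covered = False  # current student already received the previous spare
--     for i, val in enumerate(suits):
--         if covered:
--             val = 1
--         covered = False
--         if val == 2:
--             attend += 1
--             if i > 0 and prev == 0:
--                 attend += 1      # lend backwards: the previous student is rescued
--                 prev = 1
--             elif i + 1 < n and suits[i + 1] == 0: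
--                 covered = True   # lend forwards
--                 prev = 1
--             else:
--                 prev = 2
--         else:
--             if val == 1:
--                 attend += 1
--             prev = val
--     return attend
-- ===== Notes on version B (the rewrite author's own statement) =====
-- stated objective: alternative
-- what changed: Replaces A's mutating scan (a borrow_gym_suit helper rewriting two array cells per lend) followed by two whole-array counting passes with a single streaming pass that never mutates the array and keeps only O(1) state (previous student's suit count, a covered flag, a running attendee count); Pre_ excludes only inputs where A raises IndexError (student numbers outside [1-n, n], and the n = 1 input whose single student ends with two suits).
import Mathlib
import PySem

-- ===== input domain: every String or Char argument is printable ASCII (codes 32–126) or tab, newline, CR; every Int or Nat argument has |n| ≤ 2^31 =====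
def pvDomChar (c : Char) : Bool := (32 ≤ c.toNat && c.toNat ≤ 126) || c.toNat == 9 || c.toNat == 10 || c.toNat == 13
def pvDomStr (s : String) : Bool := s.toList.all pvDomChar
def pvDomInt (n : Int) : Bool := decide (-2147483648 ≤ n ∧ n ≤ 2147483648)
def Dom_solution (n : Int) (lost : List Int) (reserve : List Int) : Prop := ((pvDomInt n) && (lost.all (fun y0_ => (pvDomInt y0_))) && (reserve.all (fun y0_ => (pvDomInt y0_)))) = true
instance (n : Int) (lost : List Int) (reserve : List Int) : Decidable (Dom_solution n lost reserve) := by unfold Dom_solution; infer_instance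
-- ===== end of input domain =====

-- B replaces A's mutating scan (a helper rewriting two array cells per lend) and its two final
-- counting passes by a single non-mutating streaming pass with O(1) extra state
-- (objective: alternative; same return value on every input A returns on).

-- ===== PORT A =====

-- Python's list is ported as `Array Int` (O(1) index access, as in CPython); `aGet?`/`aSet?`
-- are Python's exact indexing (negative wrap, `none` = IndexError) via `PySem.List.pyIdx?`,
-- and the proofs relate them to `PySem.List.pyGet?`/`pySet?` on `Array.toList`.
def aGet? (xs : Array Int) (i : Int) : Option Int :=
  (PySem.List.pyIdx? xs.size i).bind fun j => xs[j]?

def aSet? (xs : Array Int) (i : Int) (v : Int) : Option (Array Int) :=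
  (PySem.List.pyIdx? xs.size i).map fun j => xs.setIfInBounds j v

def aGetD (xs : Array Int) (i : Int) (d : Int) : Int := (aGet? xs i).getD d

/-- `borrow_gym_suit`: `none` exactly where Python raises IndexError. -/
def borrowGymSuit (inst : Array Int) (receiver : Int) (donator : Int) :
    Option (Array Int × Bool) :=
  (aGet? inst (donator + receiver)).bind fun v =>
    if v = 0 then
      (aSet? inst (donator + receiver) (v + 1)).bind fun g1 =>
        (aGet? g1 donator).bind fun w =>
          (aSet? g1 donator (w - 1)).map fun g2 => (g2, true)
    else some (inst, false)

/-- one `suits[val - 1] += δ` item update (δ = -1 in the lost loop, +1 in the reserve loop);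
    shared by both ports, whose Python setup loops are the same statements. -/
def adjustAt (g : Array Int) (val : Int) (δ : Int) : Option (Array Int) :=
  (aGet? g (val - 1)).bind fun v => aSet? g (val - 1) (v + δ)

/-- the `for key, val in enumerate(gym_suit_list)` loop: Python's list iterator reads the live,
    mutated list, so we loop by index over the (length-invariant) array; `fuel` counts the
    remaining iterations (initially the array's size). -/
def scanA : Nat → Array Int → Nat → Option (Array Int)
  | 0, g, _ => some g
  | fuel + 1, g, k =>
    (if aGetD g (k : Int) 0 = 2 then
        (if k = 0 then (borrowGymSuit g 1 (k : Int)).map Prod.fst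
         else if k = g.size - 1 then (borrowGymSuit g (-1) (k : Int)).map Prod.fst
         else (borrowGymSuit g (-1) (k : Int)).bind fun p =>
                if p.2 then some p.1 else (borrowGymSuit p.1 1 (k : Int)).map Prod.fst)
      else some g).bind fun g' => scanA fuel g' (k + 1)

def solution (n : Int) (lost : List Int) (reserve : List Int) : Int :=
  let gym0 : Array Int := Array.replicate n.toNat 1
  let afterLost := lost.foldl (fun g? val => g?.bind fun gg => adjustAt gg val (-1)) (some gym0)
  let afterReserve := reserve.foldl (fun g? val => g?.bind fun gg => adjustAt gg val 1) afterLost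
  match afterReserve.bind (fun g => scanA g.size g 0) with
  | none => 0   -- Python raises an exception on these inputs (they are excluded by Pre_solution)
  | some g => (PySem.List.count g.toList 1 : Int) + (PySem.List.count g.toList 2 : Int)

-- ===== PORT B =====

/-- the body of B's single streaming pass; state = (attend, prev, covered).
    `suits` is read only at indices the Python reads too (`i` in range, and `i + 1`
    guarded by `i + 1 < n`), so the default in `aGetD` is never taken. -/
def bStep (suits : Array Int) (n : Int) :
    Int × Int × Bool → Int → Int × Int × Bool
  | (attend, prev, covered), i =>
    let val : Int := if covered then 1 else aGetD suits i 0
    if val = 2 then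
      if 0 < i ∧ prev = 0 then (attend + 2, 1, false)
      else if i + 1 < n ∧ aGetD suits (i + 1) 0 = 0 then (attend + 1, 1, true)
      else (attend + 1, 2, false)
    else (attend + (if val = 1 then 1 else 0), val, false)

def solution_alt (n : Int) (lost : List Int) (reserve : List Int) : Int :=
  let suits0 : Array Int := Array.replicate n.toNat 1
  let afterLost := lost.foldl (fun g? v => g?.bind fun gg => adjustAt gg v (-1)) (some suits0)
  let afterReserve := reserve.foldl (fun g? v => g?.bind fun gg => adjustAt gg v 1) afterLost
  match afterReserve with
  | none => 0   -- Python raises in the setup loops here (excluded by Pre_solution)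
  | some suits => ((PySem.List.pyRange 0 n 1).foldl (bStep suits n) (0, 0, false)).1

-- ===== PRECONDITION & SPEC =====

-- Pre_ excludes exactly the inputs on which A raises IndexError: a student number outside
-- [1 - n, n] (an out-of-range array index), and the n = 1 input whose single student ends
-- with two suits (A's key == 0 branch then reads index 1 of a length-1 array).
def Pre_solution (n : Int) (lost : List Int) (reserve : List Int) : Prop :=
  (∀ v ∈ lost, 1 - n ≤ v ∧ v ≤ n) ∧ (∀ v ∈ reserve, 1 - n ≤ v ∧ v ≤ n) ∧
    ¬(n = 1 ∧ (reserve.length : Int) = (lost.length : Int) + 1)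
instance (n : Int) (lost : List Int) (reserve : List Int) : Decidable (Pre_solution n lost reserve) := by
  unfold Pre_solution; infer_instance

def pvWitness_solution : Int × List Int × List Int := (3, [1], [2])

def Spec_solution (n : Int) (lost : List Int) (reserve : List Int) (out : Int) : Prop :=
  out = solution_alt n lost reserve
instance (n : Int) (lost : List Int) (reserve : List Int) (out : Int) : Decidable (Spec_solution n lost reserve out) := by
  unfold Spec_solution; infer_instance

-- ===== CLAIM (what is proved, stated in full; the proofs are below) =====
def Claim_equal_solution : Prop := ∀ (n : Int) (lost : List Int) (reserve : List Int), Dom_solution n lost reserve → Pre_solution n lost reserve → Spec_solution n lost reserve (solution n lost reserve)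
-- ===== LEMMAS AND PROOFS =====

-- list models of the array ports (the statements below are proved on these, then carried
-- to the arrays through `Array.toList` bridges)

def borrowGymSuitL (inst : List Int) (receiver : Int) (donator : Int) :
    Option (List Int × Bool) :=
  (PySem.List.pyGet? inst (donator + receiver)).bind fun v =>
    if v = 0 then
      (PySem.List.pySet? inst (donator + receiver) (v + 1)).bind fun g1 =>
        (PySem.List.pyGet? g1 donator).bind fun w =>
          (PySem.List.pySet? g1 donator (w - 1)).map fun g2 => (g2, true)
    else some (inst, false)

def adjustAtL (g : List Int) (val : Int) (δ : Int) : Option (List Int) :=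
  (PySem.List.pyGet? g (val - 1)).bind fun v => PySem.List.pySet? g (val - 1) (v + δ)

def scanAL : Nat → List Int → Nat → Option (List Int)
  | 0, g, _ => some g
  | fuel + 1, g, k =>
    (if PySem.List.pyGetD g (k : Int) 0 = 2 then
        (if k = 0 then (borrowGymSuitL g 1 (k : Int)).map Prod.fst
         else if k = g.length - 1 then (borrowGymSuitL g (-1) (k : Int)).map Prod.fst
         else (borrowGymSuitL g (-1) (k : Int)).bind fun p =>
                if p.2 then some p.1 else (borrowGymSuitL p.1 1 (k : Int)).map Prod.fst)
      else some g).bind fun g' => scanAL fuel g' (k + 1)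

def bStepL (suits : List Int) (n : Int) :
    Int × Int × Bool → Int → Int × Int × Bool
  | (attend, prev, covered), i =>
    let val : Int := if covered then 1 else PySem.List.pyGetD suits i 0
    if val = 2 then
      if 0 < i ∧ prev = 0 then (attend + 2, 1, false)
      else if i + 1 < n ∧ PySem.List.pyGetD suits (i + 1) 0 = 0 then (attend + 1, 1, true)
      else (attend + 1, 2, false)
    else (attend + (if val = 1 then 1 else 0), val, false)

-- the `Array.toList` bridges

lemma aGet?_eq (a : Array Int) (i : Int) : aGet? a i = PySem.List.pyGet? a.toList i := by
  simp [aGet?, PySem.List.pyGet?]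

lemma aSet?_eq (a : Array Int) (i v : Int) :
    (aSet? a i v).map Array.toList = PySem.List.pySet? a.toList i v := by
  simp only [aSet?, PySem.List.pySet?, Option.map_map, Array.length_toList]
  cases PySem.List.pyIdx? a.size i <;> simp

lemma aGetD_eq (a : Array Int) (i d : Int) : aGetD a i d = PySem.List.pyGetD a.toList i d := by
  simp [aGetD, aGet?_eq, PySem.List.pyGetD, PySem.List.pyGet?]

lemma borrow_eq (a : Array Int) (r d : Int) :
    (borrowGymSuit a r d).map (fun p => (p.1.toList, p.2)) = borrowGymSuitL a.toList r d := by
  rw [borrowGymSuit, borrowGymSuitL, ← aGet?_eq]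
  cases aGet? a (d + r) with
  | none => rfl
  | some v =>
    simp only [Option.bind_some]
    by_cases h0 : v = 0
    · rw [if_pos h0, if_pos h0, ← aSet?_eq]
      cases aSet? a (d + r) (v + 1) with
      | none => rfl
      | some g1 =>
        simp only [Option.map_some, Option.bind_some, ← aGet?_eq]
        cases aGet? g1 d with
        | none => rfl
        | some w =>
          simp only [Option.bind_some, ← aSet?_eq]
          cases aSet? g1 d (w - 1) <;> rfl
    · rw [if_neg h0, if_neg h0]
      rfl

lemma adjust_eq (a : Array Int) (v δ : Int) :
    (adjustAt a v δ).map Array.toList = adjustAtL a.toList v δ := by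
  rw [adjustAt, adjustAtL, ← aGet?_eq]
  cases aGet? a (v - 1) with
  | none => rfl
  | some w => simp only [Option.bind_some, ← aSet?_eq]

lemma foldl_bind_none {σ : Type} (f : σ → Int → Option σ) (vs : List Int) :
    vs.foldl (fun g? val => g?.bind fun gg => f gg val) (none : Option σ) = none := by
  induction vs with
  | nil => rfl
  | cons v vs ih => simpa using ih

lemma foldl_adjust_eq (δ : Int) : ∀ (vs : List Int) (a : Array Int),
    (vs.foldl (fun g? val => g?.bind fun gg => adjustAt gg val δ) (some a)).map Array.toList =
      vs.foldl (fun g? val => g?.bind fun gg => adjustAtL gg val δ) (some a.toList) := by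
  intro vs
  induction vs with
  | nil => intro a; rfl
  | cons v vs ih =>
    intro a
    rw [List.foldl_cons, List.foldl_cons]
    simp only [Option.bind_some]
    cases h : adjustAt a v δ with
    | none =>
      have h2 : adjustAtL a.toList v δ = none := by rw [← adjust_eq, h]; rfl
      rw [h2, foldl_bind_none, foldl_bind_none]
      rfl
    | some a' =>
      have h2 : adjustAtL a.toList v δ = some a'.toList := by rw [← adjust_eq, h]; rfl
      rw [h2]
      exact ih a'

lemma scan_eq : ∀ (fuel : Nat) (a : Array Int) (k : Nat),
    (scanA fuel a k).map Array.toList = scanAL fuel a.toList k := by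
  intro fuel
  induction fuel with
  | zero => intro a k; rfl
  | succ fuel ih =>
    intro a k
    rw [scanA, scanAL, aGetD_eq]
    by_cases h2 : PySem.List.pyGetD a.toList (k : Int) 0 = 2
    · rw [if_pos h2, if_pos h2]
      have hlen : a.toList.length = a.size := Array.length_toList
      by_cases hk0 : k = 0
      · rw [if_pos hk0, if_pos hk0, ← borrow_eq]
        cases borrowGymSuit a 1 (k : Int) with
        | none => rfl
        | some p => simpa using ih p.1 (k + 1)
      · rw [if_neg hk0, if_neg hk0, hlen]
        by_cases hkl : k = a.size - 1
        · rw [if_pos hkl, if_pos hkl, ← borrow_eq]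
          cases borrowGymSuit a (-1) (k : Int) with
          | none => rfl
          | some p => simpa using ih p.1 (k + 1)
        · rw [if_neg hkl, if_neg hkl, ← borrow_eq]
          cases borrowGymSuit a (-1) (k : Int) with
          | none => rfl
          | some p =>
            simp only [Option.map_some, Option.bind_some]
            by_cases hp : p.2
            · rw [if_pos hp, if_pos hp]
              simpa using ih p.1 (k + 1)
            · rw [if_neg hp, if_neg hp, ← borrow_eq]
              cases borrowGymSuit p.1 1 (k : Int) with
              | none => rfl
              | some q => simpa using ih q.1 (k + 1)
    · rw [if_neg h2, if_neg h2]
      simpa using ih a (k + 1)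

lemma bStep_eq (suits : Array Int) (n : Int) : bStep suits n = bStepL suits.toList n := by
  funext st i
  obtain ⟨attend, prev, covered⟩ := st
  simp only [bStep, bStepL, aGetD_eq]


lemma getD_set_self (l : List Int) (i : Nat) (v : Int) (h : i < l.length) :
    (l.set i v).getD i 0 = v := by
  rw [List.getD_eq_getElem?_getD, List.getElem?_set_self (by simpa using h)]
  rfl

lemma getD_set_ne (l : List Int) (i j : Nat) (v : Int) (h : j ≠ i) :
    (l.set i v).getD j 0 = l.getD j 0 := by
  rw [List.getD_eq_getElem?_getD, List.getD_eq_getElem?_getD,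
    List.getElem?_set_ne (fun e => h e.symm)]

lemma getD_replicate_one (n i : Nat) (h : i < n) :
    (List.replicate n (1 : Int)).getD i 0 = 1 := by
  rw [List.getD_eq_getElem (List.replicate n (1 : Int)) 0 (by simpa using h)]
  simp

/-- the two cells a successful lend touches, everything else untouched. -/
lemma getD_set2 (g : List Int) (k j : Nat) (hk : k < g.length) (hj : j < g.length) (i : Nat) :
    ((g.set j 1).set k 1).getD i 0 = if i = k then 1 else if i = j then 1 else g.getD i 0 := by
  have hkset : k < (g.set j 1).length := by simpa using hk
  by_cases hik : i = k
  · rw [hik, if_pos rfl]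
    exact getD_set_self _ _ _ hkset
  · rw [if_neg hik, getD_set_ne _ _ _ _ hik]
    by_cases hij : i = j
    · rw [hij, if_pos rfl]
      exact getD_set_self _ _ _ hj
    · rw [if_neg hij, getD_set_ne _ _ _ _ hij]

lemma borrow_left (g : List Int) (k : Nat) (h1 : 1 ≤ k) (h2 : k < g.length) :
    borrowGymSuitL g (-1) (k : Int) =
      if g.getD (k - 1) 0 = 0
      then some ((g.set (k - 1) 1).set k (g.getD k 0 - 1), true)
      else some (g, false) := by
  have e1 : (k : Int) + (-1) = ((k - 1 : Nat) : Int) := by omega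
  have hk1 : k - 1 < g.length := by omega
  unfold borrowGymSuitL
  rw [e1, PySem.List.pyGet?_natCast, List.getElem?_eq_getElem hk1, Option.bind_some,
    List.getD_eq_getElem g 0 hk1, List.getD_eq_getElem g 0 h2]
  by_cases h0 : g[k - 1] = 0
  · rw [if_pos h0, if_pos h0, h0, PySem.List.pySet?_natCast _ _ _ hk1, Option.bind_some]
    have hk2 : k < (g.set (k - 1) ((0 : Int) + 1)).length := by simpa using h2
    rw [PySem.List.pyGet?_natCast, List.getElem?_eq_getElem hk2, Option.bind_some,
      PySem.List.pySet?_natCast _ _ _ hk2, Option.map_some]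
    have hvv : (g.set (k - 1) ((0 : Int) + 1))[k] = g[k] := by
      rw [List.getElem_set_ne (by omega : k - 1 ≠ k)]
    rw [hvv]
    norm_num
  · rw [if_neg h0, if_neg h0]

lemma borrow_right (g : List Int) (k : Nat) (h2 : k + 1 < g.length) :
    borrowGymSuitL g 1 (k : Int) =
      if g.getD (k + 1) 0 = 0
      then some ((g.set (k + 1) 1).set k (g.getD k 0 - 1), true)
      else some (g, false) := by
  have e1 : (k : Int) + 1 = ((k + 1 : Nat) : Int) := by push_cast; ring
  have hk : k < g.length := by omega
  unfold borrowGymSuitL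
  rw [e1, PySem.List.pyGet?_natCast, List.getElem?_eq_getElem h2, Option.bind_some,
    List.getD_eq_getElem g 0 h2, List.getD_eq_getElem g 0 hk]
  by_cases h0 : g[k + 1] = 0
  · rw [if_pos h0, if_pos h0, h0, PySem.List.pySet?_natCast _ _ _ h2, Option.bind_some]
    have hk2 : k < (g.set (k + 1) ((0 : Int) + 1)).length := by simpa using hk
    rw [PySem.List.pyGet?_natCast, List.getElem?_eq_getElem hk2, Option.bind_some,
      PySem.List.pySet?_natCast _ _ _ hk2, Option.map_some]
    have hvv : (g.set (k + 1) ((0 : Int) + 1))[k] = g[k] := by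
      rw [List.getElem_set_ne (by omega : k + 1 ≠ k)]
    rw [hvv]
    norm_num
  · rw [if_neg h0, if_neg h0]

/-- a cell that A's final count (`count 1 + count 2`) includes. -/
def cellOk (g : List Int) (j : Nat) : Bool := decide (g.getD j 0 = 1 ∨ g.getD j 0 = 2)

lemma countP_range_succ (g : List Int) (k : Nat) :
    (List.range (k + 1)).countP (cellOk g) =
      (List.range k).countP (cellOk g) + (if cellOk g k then 1 else 0) := by
  rw [List.range_succ, List.countP_append]
  simp [List.countP_cons]

lemma countP_congr_range (g1 g2 : List Int) (k : Nat)
    (h : ∀ j, j < k → g1.getD j 0 = g2.getD j 0) :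
    (List.range k).countP (cellOk g1) = (List.range k).countP (cellOk g2) :=
  List.countP_congr (fun j hj => by
    have h' := h j (List.mem_range.1 hj)
    simp only [cellOk, decide_eq_true_eq]
    rw [h'])

lemma countP12_eq : ∀ (g : List Int),
    (List.range g.length).countP (cellOk g) = List.count 1 g + List.count 2 g := by
  intro g
  induction g with
  | nil => simp
  | cons a g ih =>
    rw [List.length_cons, List.range_succ_eq_map, List.countP_cons, List.countP_map]
    have hcongr : (List.range g.length).countP (cellOk (a :: g) ∘ Nat.succ) =
        (List.range g.length).countP (cellOk g) := by
      apply List.countP_congr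
      intro j _
      simp [cellOk]
    rw [hcongr, ih]
    have hz : cellOk (a :: g) 0 = decide (a = 1 ∨ a = 2) := by
      simp [cellOk]
    rw [hz]
    by_cases h1 : a = 1
    · simp [h1]
      omega
    · by_cases hh2 : a = 2
      · simp [hh2]
        omega
      · simp [h1, hh2]

/-- `suits[v-1] += δ` with Python's (possibly negative, wrapping) index. -/
lemma adjustAt_wrap (g : List Int) (v δ : Int) (h3 : 0 < g.length)
    (h1 : 1 - (g.length : Int) ≤ v) (h2 : v ≤ (g.length : Int)) :
    adjustAtL g v δ = some (g.set (PySem.Int.mod (v - 1) (g.length : Int)).toNat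
      (g.getD (PySem.Int.mod (v - 1) (g.length : Int)).toNat 0 + δ)) := by
  have hb : (0 : Int) < (g.length : Int) := by exact_mod_cast h3
  have hm : PySem.Int.mod (v - 1) (g.length : Int) = (v - 1) % (g.length : Int) :=
    PySem.Int.mod_eq_emod_of_pos hb
  have hlb : (0 : Int) ≤ (v - 1) % (g.length : Int) := Int.emod_nonneg _ (by omega)
  have hub : (v - 1) % (g.length : Int) < (g.length : Int) := Int.emod_lt_of_pos _ hb
  have hmod_pos : 0 ≤ v - 1 → (v - 1) % (g.length : Int) = v - 1 :=
    fun h => Int.emod_eq_of_lt h (by omega)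
  have hmod_neg : v - 1 < 0 → (v - 1) % (g.length : Int) = v - 1 + g.length := by
    intro h
    have h1 : (v - 1 + (g.length : Int) * 1) % (g.length : Int) = (v - 1) % (g.length : Int) :=
      Int.add_mul_emod_self_left (v - 1) ((g.length : Int)) 1
    have h2 : (v - 1 + (g.length : Int) * 1) % (g.length : Int) = v - 1 + (g.length : Int) * 1 :=
      Int.emod_eq_of_lt (by omega) (by omega)
    have := h1.symm.trans h2
    omega
  have hjl : (PySem.Int.mod (v - 1) (g.length : Int)).toNat < g.length := by
    rw [hm]; omega
  have hidx : PySem.List.pyIdx? g.length (v - 1) =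
      some (PySem.Int.mod (v - 1) (g.length : Int)).toNat := by
    unfold PySem.List.pyIdx?
    by_cases hvp : 0 ≤ v - 1
    · rw [if_pos hvp, if_pos (by omega)]
      rw [hm]
      congr 1
      have := hmod_pos hvp
      omega
    · rw [if_neg hvp, if_pos (by omega)]
      rw [hm]
      congr 1
      have := hmod_neg (by omega)
      omega
  simp only [adjustAtL, PySem.List.pyGet?, PySem.List.pySet?]
  rw [hidx, Option.bind_some, List.getElem?_eq_getElem hjl, Option.bind_some, Option.map_some,
    List.getD_eq_getElem g 0 hjl]

lemma adjust_loop_wrap (δ : Int) : ∀ (vs g : List Int),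
    (∀ v ∈ vs, 1 - (g.length : Int) ≤ v ∧ v ≤ (g.length : Int)) →
    ∃ g', vs.foldl (fun g? val => g?.bind fun gg => adjustAtL gg val δ) (some g) = some g' ∧
      g'.length = g.length ∧
      ∀ i : Nat, i < g.length → g'.getD i 0 = g.getD i 0 +
        δ * (vs.countP (fun v => PySem.Int.mod (v - 1) (g.length : Int) = (i : Int))) := by
  intro vs
  induction vs with
  | nil => intro g _; exact ⟨g, rfl, rfl, by simp⟩
  | cons v vs ih =>
    intro g hr
    have hv := hr v (by simp)
    have h3 : 0 < g.length := by
      rcases Nat.eq_zero_or_pos g.length with h | h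
      · exfalso
        rw [h] at hv
        simp at hv
        omega
      · exact h
    rw [List.foldl_cons]
    simp only [Option.bind_some]
    rw [adjustAt_wrap g v δ h3 hv.1 hv.2]
    have hm : PySem.Int.mod (v - 1) (g.length : Int) = (v - 1) % (g.length : Int) :=
      PySem.Int.mod_eq_emod_of_pos (by exact_mod_cast h3)
    have hlb : (0 : Int) ≤ (v - 1) % (g.length : Int) := Int.emod_nonneg _ (by omega)
    have hub : (v - 1) % (g.length : Int) < (g.length : Int) :=
      Int.emod_lt_of_pos _ (by exact_mod_cast h3)
    set j : Nat := (PySem.Int.mod (v - 1) (g.length : Int)).toNat with hjdef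
    have hj2 : (j : Int) = (v - 1) % (g.length : Int) := by
      rw [hjdef, hm]; omega
    have hjl : j < g.length := by omega
    obtain ⟨g', e', l', p'⟩ := ih (g.set j (g.getD j 0 + δ))
      (by intro x hx; simpa using hr x (by simp [hx]))
    refine ⟨g', e', by simpa using l', ?_⟩
    intro i hi
    rw [p' i (by simpa using hi)]
    simp only [List.length_set]
    rw [List.countP_cons]
    by_cases hij : i = j
    · rw [hij, getD_set_self _ _ _ hjl]
      rw [if_pos (by simp only [hm, decide_eq_true_eq]; omega)]
      push_cast
      ring
    · rw [getD_set_ne _ _ _ _ hij]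
      rw [if_neg (by simp only [hm, decide_eq_true_eq]; omega)]
      push_cast
      ring

/-- main bisimulation: from position `k` on, A's mutating array scan and B's non-mutating
    streaming pass over `suits` (the array as both setups left it) agree; `prev` is the
    previous cell's current value, `covered` says cell `k` was covered by a lend from the
    left, `attend` counts the attendees among cells `< k`. -/
lemma scan_sim : ∀ (fuel : Nat) (g : List Int) (k : Nat) (suits : List Int)
    (n attend prev : Int) (covered : Bool),
    fuel + k = g.length →
    suits.length = g.length →
    n = (g.length : Int) →
    (∀ i : Nat, k ≤ i → i < g.length →
      g.getD i 0 = (if covered ∧ i = k then 1 else suits.getD i 0)) →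
    (1 ≤ k → prev = g.getD (k - 1) 0) →
    attend = (((List.range k).countP (cellOk g) : Nat) : Int) →
    (k = 0 → g.length = 1 → g.getD 0 0 ≠ 2) →
    ∃ g', scanAL fuel g k = some g' ∧
      ((PySem.List.pyRange (k : Int) n 1).foldl (bStepL suits n) (attend, prev, covered)).1 =
        (List.count 1 g' : Int) + (List.count 2 g' : Int) := by
  intro fuel
  induction fuel with
  | zero =>
    intro g k suits n attend prev covered hfk hsl hn hsuf hprev hatt hcrash
    have hnil : PySem.List.pyRange (k : Int) n 1 = [] :=
      PySem.List.pyRange_one_eq_nil (by omega)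
    refine ⟨g, by simp [scanAL], ?_⟩
    rw [hnil]
    simp only [List.foldl_nil]
    rw [hatt, show k = g.length from by omega]
    exact_mod_cast congrArg (fun m : Nat => (m : Int)) (countP12_eq g)
  | succ fuel ih =>
    intro g k suits n attend prev covered hfk hsl hn hsuf hprev hatt hcrash
    have hk : k < g.length := by omega
    have hcons : PySem.List.pyRange (k : Int) n 1 = (k : Int) :: PySem.List.pyRange ((k : Int) + 1) n 1 :=
      PySem.List.pyRange_one_cons (by omega)
    have hvalk : (if covered then (1 : Int) else PySem.List.pyGetD suits (k : Int) 0) = g.getD k 0 := by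
      have h := hsuf k le_rfl hk
      rw [PySem.List.pyGetD_natCast]
      by_cases hc : covered <;> simp [hc] at h ⊢ <;> omega
    have hgetDsuits : ∀ i : Nat, k < i → i < g.length →
        PySem.List.pyGetD suits (i : Int) 0 = g.getD i 0 := by
      intro i h1i h2i
      rw [PySem.List.pyGetD_natCast, hsuf i (by omega) h2i,
        if_neg (by omega : ¬(covered ∧ i = k))]
    -- one finisher for all step shapes
    have finish : ∀ (g2 : List Int) (a' p' : Int) (c' : Bool),
        scanAL (fuel + 1) g k = scanAL fuel g2 (k + 1) →
        bStepL suits n (attend, prev, covered) (k : Int) = (a', p', c') →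
        g2.length = g.length →
        (∀ i : Nat, k + 1 ≤ i → i < g.length →
          g2.getD i 0 = (if c' ∧ i = k + 1 then 1 else suits.getD i 0)) →
        p' = g2.getD k 0 →
        a' = (((List.range (k + 1)).countP (cellOk g2) : Nat) : Int) →
        ∃ g', scanAL (fuel + 1) g k = some g' ∧
          ((PySem.List.pyRange (k : Int) n 1).foldl (bStepL suits n) (attend, prev, covered)).1 =
            (List.count 1 g' : Int) + (List.count 2 g' : Int) := by
      intro g2 a' p' c' hstepA hstepB hlen2 hsuf2 hprev2 hatt2
      obtain ⟨g', e', hfold⟩ := ih g2 (k + 1) suits n a' p' c'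
        (by rw [hlen2]; omega)
        (by rw [hlen2]; exact hsl)
        (by rw [hlen2]; exact hn)
        (by intro i h1i h2i; rw [hlen2] at h2i; exact hsuf2 i h1i h2i)
        (fun _ => by simpa using hprev2)
        hatt2
        (fun h => absurd h (Nat.succ_ne_zero k))
      refine ⟨g', hstepA.trans e', ?_⟩
      rw [hcons, List.foldl_cons, hstepB]
      rw [show ((k + 1 : Nat) : Int) = (k : Int) + 1 from by push_cast; ring] at hfold
      exact hfold
    by_cases h2 : g.getD k 0 = 2
    · -- the current student has two suits
      by_cases hk0 : k = 0
      · -- key == 0: only the right neighbour is tried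
        have hlen1 : 1 < g.length := by
          by_contra hcon
          exact hcrash hk0 (by omega) (by rw [← hk0]; exact h2)
        have hnotg1 : ¬(0 < (k : Int) ∧ prev = 0) := by
          rw [hk0]; simp
        have hg1eq : PySem.List.pyGetD suits ((k : Int) + 1) 0 = g.getD (k + 1) 0 := by
          rw [show ((k : Int) + 1) = ((k + 1 : Nat) : Int) from by push_cast; ring]
          exact hgetDsuits (k + 1) (by omega) (by omega)
        have hkn1 : (k : Int) + 1 < n := by rw [hn]; exact_mod_cast by omega
        have hstep_base : scanAL (fuel + 1) g k =
            (if g.getD (k + 1) 0 = 0 then scanAL fuel ((g.set (k + 1) 1).set k 1) (k + 1)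
             else scanAL fuel g (k + 1)) := by
          simp only [scanAL]
          rw [show PySem.List.pyGetD g (k : Int) 0 = g.getD k 0 from by simp, if_pos h2,
            if_pos hk0, borrow_right g k (by omega)]
          by_cases hg1 : g.getD (k + 1) 0 = 0
          · rw [if_pos hg1, if_pos hg1, h2, show (2 : Int) - 1 = 1 from by norm_num]
            simp
          · rw [if_neg hg1, if_neg hg1]
            simp
        by_cases hg1 : g.getD (k + 1) 0 = 0
        · -- lend right
          have hB : bStepL suits n (attend, prev, covered) (k : Int) = (attend + 1, 1, true) := by
            simp only [bStepL]
            rw [hvalk, if_pos h2, if_neg hnotg1, if_pos ⟨hkn1, by rw [hg1eq]; exact hg1⟩]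
          refine finish ((g.set (k + 1) 1).set k 1) (attend + 1) 1 true
            (by rw [hstep_base, if_pos hg1]) hB (by simp) ?_ ?_ ?_
          · intro i h1i h2i
            rw [getD_set2 g k (k + 1) hk (by omega) i,
              if_neg (by omega : ¬ i = k)]
            by_cases hik1 : i = k + 1
            · rw [if_pos hik1, if_pos (by simp [hik1])]
            · rw [if_neg hik1, if_neg (by simp [hik1])]
              rw [hsuf i (by omega) h2i, if_neg (by omega : ¬(covered ∧ i = k))]
          · rw [getD_set2 g k (k + 1) hk (by omega) k, if_pos rfl]
          · have hc1 : (List.range k).countP (cellOk ((g.set (k + 1) 1).set k 1)) =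
                (List.range k).countP (cellOk g) := by
              apply countP_congr_range
              intro j hj
              rw [getD_set2 g k (k + 1) hk (by omega) j, if_neg (by omega), if_neg (by omega)]
            have hcellk : cellOk ((g.set (k + 1) 1).set k 1) k = true := by
              simp only [cellOk, decide_eq_true_eq]
              rw [getD_set2 g k (k + 1) hk (by omega) k, if_pos rfl]
              norm_num
            rw [countP_range_succ, hc1, if_pos hcellk, hatt]
            push_cast
            ring
        · -- no lend
          have hB : bStepL suits n (attend, prev, covered) (k : Int) = (attend + 1, 2, false) := by
            simp only [bStepL]
            rw [hvalk, if_pos h2, if_neg hnotg1,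
              if_neg (by rw [hg1eq]; exact fun h => hg1 h.2)]
          refine finish g (attend + 1) 2 false
            (by rw [hstep_base, if_neg hg1]) hB rfl ?_ (by rw [h2]) ?_
          · intro i h1i h2i
            rw [hsuf i (by omega) h2i, if_neg (by omega : ¬(covered ∧ i = k)),
              if_neg (by simp)]
          · rw [countP_range_succ, if_pos (by simp only [cellOk, decide_eq_true_eq]; exact Or.inr h2), hatt]
            push_cast
            ring
      · -- k >= 1
        have hprevS : prev = g.getD (k - 1) 0 := hprev (by omega)
        have hkpos : (0 : Int) < (k : Int) := by exact_mod_cast Nat.pos_of_ne_zero hk0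
        by_cases hgl : g.getD (k - 1) 0 = 0
        · -- lend left (A does this in both the key == last and the middle branch)
          have hstep_base : scanAL (fuel + 1) g k =
              scanAL fuel ((g.set (k - 1) 1).set k 1) (k + 1) := by
            simp only [scanAL]
            rw [show PySem.List.pyGetD g (k : Int) 0 = g.getD k 0 from by simp, if_pos h2,
              if_neg hk0, borrow_left g k (by omega) hk, if_pos hgl, h2,
              show (2 : Int) - 1 = 1 from by norm_num]
            by_cases hklast : k = g.length - 1
            · rw [if_pos hklast]
              simp
            · rw [if_neg hklast]
              simp
          have hB : bStepL suits n (attend, prev, covered) (k : Int) = (attend + 2, 1, false) := by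
            simp only [bStepL]
            rw [hvalk, if_pos h2, if_pos ⟨hkpos, by rw [hprevS]; exact hgl⟩]
          refine finish ((g.set (k - 1) 1).set k 1) (attend + 2) 1 false
            hstep_base hB (by simp) ?_ ?_ ?_
          · intro i h1i h2i
            rw [getD_set2 g k (k - 1) hk (by omega) i,
              if_neg (by omega : ¬ i = k), if_neg (by omega : ¬ i = k - 1),
              if_neg (by simp)]
            rw [hsuf i (by omega) h2i, if_neg (by omega : ¬(covered ∧ i = k))]
          · rw [getD_set2 g k (k - 1) hk (by omega) k, if_pos rfl]
          · have hksub : k - 1 + 1 = k := by omega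
            have hc1 : (List.range (k - 1)).countP (cellOk ((g.set (k - 1) 1).set k 1)) =
                (List.range (k - 1)).countP (cellOk g) := by
              apply countP_congr_range
              intro j hj
              rw [getD_set2 g k (k - 1) hk (by omega) j, if_neg (by omega), if_neg (by omega)]
            have hcell1 : cellOk ((g.set (k - 1) 1).set k 1) (k - 1) = true := by
              simp only [cellOk, decide_eq_true_eq]
              rw [getD_set2 g k (k - 1) hk (by omega) (k - 1),
                if_neg (by omega : ¬ k - 1 = k), if_pos rfl]
              norm_num
            have hcell2 : cellOk ((g.set (k - 1) 1).set k 1) k = true := by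
              simp only [cellOk, decide_eq_true_eq]
              rw [getD_set2 g k (k - 1) hk (by omega) k, if_pos rfl]
              norm_num
            have e1 : (List.range (k + 1)).countP (cellOk ((g.set (k - 1) 1).set k 1)) =
                (List.range (k - 1)).countP (cellOk g) + 2 := by
              rw [countP_range_succ, show k = (k - 1) + 1 from by omega]
              rw [countP_range_succ, hksub, hc1, if_pos hcell1, if_pos hcell2]
            have e2 : (List.range k).countP (cellOk g) =
                (List.range (k - 1)).countP (cellOk g) := by
              rw [show k = (k - 1) + 1 from by omega, countP_range_succ, hksub,
                if_neg (by simp only [cellOk, decide_eq_true_eq, hgl]; norm_num)]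
              omega
            rw [e1, hatt, e2]
            push_cast
            ring
        · -- no lend to the left
          have hnotg1 : ¬(0 < (k : Int) ∧ prev = 0) := by
            rw [hprevS]; exact fun h => hgl h.2
          by_cases hklast : k = g.length - 1
          · -- key == last: no lend at all
            have hstep_base : scanAL (fuel + 1) g k = scanAL fuel g (k + 1) := by
              simp only [scanAL]
              rw [show PySem.List.pyGetD g (k : Int) 0 = g.getD k 0 from by simp, if_pos h2,
                if_neg hk0, if_pos hklast, borrow_left g k (by omega) hk, if_neg hgl]
              simp
            have hB : bStepL suits n (attend, prev, covered) (k : Int) = (attend + 1, 2, false) := by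
              simp only [bStepL]
              rw [hvalk, if_pos h2, if_neg hnotg1,
                if_neg (by rw [hn]; exact fun h => absurd h.1 (by exact_mod_cast by omega))]
            refine finish g (attend + 1) 2 false hstep_base hB rfl ?_ (by rw [h2]) ?_
            · intro i h1i h2i
              rw [hsuf i (by omega) h2i, if_neg (by omega : ¬(covered ∧ i = k)),
                if_neg (by simp)]
            · rw [countP_range_succ, if_pos (by simp only [cellOk, decide_eq_true_eq]; exact Or.inr h2), hatt]
              push_cast
              ring
          · -- middle: try the right neighbour
            have hkmid : k + 1 < g.length := by omega
            have hkn1 : (k : Int) + 1 < n := by rw [hn]; exact_mod_cast by omega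
            have hgreq : PySem.List.pyGetD suits ((k : Int) + 1) 0 = g.getD (k + 1) 0 := by
              rw [show ((k : Int) + 1) = ((k + 1 : Nat) : Int) from by push_cast; ring]
              exact hgetDsuits (k + 1) (by omega) hkmid
            have hstep_base : scanAL (fuel + 1) g k =
                (if g.getD (k + 1) 0 = 0 then scanAL fuel ((g.set (k + 1) 1).set k 1) (k + 1)
                 else scanAL fuel g (k + 1)) := by
              simp only [scanAL]
              rw [show PySem.List.pyGetD g (k : Int) 0 = g.getD k 0 from by simp, if_pos h2,
                if_neg hk0, if_neg hklast, borrow_left g k (by omega) hk, if_neg hgl]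
              simp only [Option.bind_some]
              rw [borrow_right g k hkmid]
              by_cases hgr : g.getD (k + 1) 0 = 0
              · rw [if_pos hgr, if_pos hgr, h2, show (2 : Int) - 1 = 1 from by norm_num]
                simp
              · rw [if_neg hgr, if_neg hgr]
                simp
            by_cases hgr : g.getD (k + 1) 0 = 0
            · -- lend right
              have hB : bStepL suits n (attend, prev, covered) (k : Int) = (attend + 1, 1, true) := by
                simp only [bStepL]
                rw [hvalk, if_pos h2, if_neg hnotg1,
                  if_pos ⟨hkn1, by rw [hgreq]; exact hgr⟩]
              refine finish ((g.set (k + 1) 1).set k 1) (attend + 1) 1 true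
                (by rw [hstep_base, if_pos hgr]) hB (by simp) ?_ ?_ ?_
              · intro i h1i h2i
                rw [getD_set2 g k (k + 1) hk (by omega) i,
                  if_neg (by omega : ¬ i = k)]
                by_cases hik1 : i = k + 1
                · rw [if_pos hik1, if_pos (by simp [hik1])]
                · rw [if_neg hik1, if_neg (by simp [hik1])]
                  rw [hsuf i (by omega) h2i, if_neg (by omega : ¬(covered ∧ i = k))]
              · rw [getD_set2 g k (k + 1) hk (by omega) k, if_pos rfl]
              · have hc1 : (List.range k).countP (cellOk ((g.set (k + 1) 1).set k 1)) =
                    (List.range k).countP (cellOk g) := by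
                  apply countP_congr_range
                  intro j hj
                  rw [getD_set2 g k (k + 1) hk (by omega) j, if_neg (by omega), if_neg (by omega)]
                have hcellk : cellOk ((g.set (k + 1) 1).set k 1) k = true := by
                  simp only [cellOk, decide_eq_true_eq]
                  rw [getD_set2 g k (k + 1) hk (by omega) k, if_pos rfl]
                  norm_num
                rw [countP_range_succ, hc1, if_pos hcellk, hatt]
                push_cast
                ring
            · -- no lend
              have hB : bStepL suits n (attend, prev, covered) (k : Int) = (attend + 1, 2, false) := by
                simp only [bStepL]
                rw [hvalk, if_pos h2, if_neg hnotg1,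
                  if_neg (by rw [hgreq]; exact fun h => hgr h.2)]
              refine finish g (attend + 1) 2 false
                (by rw [hstep_base, if_neg hgr]) hB rfl ?_ (by rw [h2]) ?_
              · intro i h1i h2i
                rw [hsuf i (by omega) h2i, if_neg (by omega : ¬(covered ∧ i = k)),
                  if_neg (by simp)]
              · rw [countP_range_succ, if_pos (by simp only [cellOk, decide_eq_true_eq]; exact Or.inr h2), hatt]
                push_cast
                ring
    · -- current cell does not hold 2: A does nothing
      have hstepA : scanAL (fuel + 1) g k = scanAL fuel g (k + 1) := by
        simp only [scanAL]
        rw [show PySem.List.pyGetD g (k : Int) 0 = g.getD k 0 from by simp, if_neg h2,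
          Option.bind_some]
      have hB : bStepL suits n (attend, prev, covered) (k : Int) =
          (attend + (if g.getD k 0 = 1 then 1 else 0), g.getD k 0, false) := by
        simp only [bStepL]
        rw [hvalk, if_neg h2]
      refine finish g (attend + (if g.getD k 0 = 1 then 1 else 0)) (g.getD k 0) false
        hstepA hB rfl ?_ rfl ?_
      · intro i h1i h2i
        rw [hsuf i (by omega) h2i, if_neg (by omega : ¬(covered ∧ i = k)), if_neg (by simp)]
      · rw [countP_range_succ, hatt]
        by_cases hv1 : g.getD k 0 = 1
        · rw [if_pos hv1, if_pos (by simp only [cellOk, decide_eq_true_eq]; exact Or.inl hv1)]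
          push_cast
          ring
        · rw [if_neg hv1, if_neg (by simp only [cellOk, decide_eq_true_eq]; rintro (h | h); exact hv1 h; exact h2 h)]
          push_cast
          ring

-- ===== VERDICT (by name: the statement is the Claim_ definition above) =====
theorem solution_spec : Claim_equal_solution := by
  intro n lost reserve _ hpre
  unfold Spec_solution
  obtain ⟨hlr, hrr, hcr⟩ := hpre
  by_cases hneg : n ≤ 0
  · -- both lists must be empty; both sides return 0
    have hle : lost = [] := by
      cases lost with
      | nil => rfl
      | cons v t =>
        have := hlr v (by simp)
        exact absurd this (by omega)
    have hre : reserve = [] := by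
      cases reserve with
      | nil => rfl
      | cons v t =>
        have := hrr v (by simp)
        exact absurd this (by omega)
    subst hle
    subst hre
    have h0 : n.toNat = 0 := by omega
    simp [solution, solution_alt, h0, scanA, PySem.List.pyRange_one_eq_nil (show n ≤ 0 from hneg),
      PySem.List.count_eq]
  · have hn1 : 1 ≤ n := by omega
    simp only [solution, solution_alt]
    have hcast : ((n.toNat : Nat) : Int) = n := Int.toNat_of_nonneg (by omega)
    have hlen0 : (List.replicate n.toNat (1 : Int)).length = n.toNat := List.length_replicate
    obtain ⟨g1, e1, l1, p1⟩ := adjust_loop_wrap (-1) lost (List.replicate n.toNat 1)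
      (by intro v hv; rw [hlen0, hcast]; exact hlr v hv)
    obtain ⟨g2, e2, l2, p2⟩ := adjust_loop_wrap 1 reserve g1
      (by intro v hv; rw [l1, hlen0, hcast]; exact hrr v hv)
    have hA0 : (Array.replicate n.toNat (1 : Int)).toList = List.replicate n.toNat 1 := by simp
    -- carry the setup folds from the arrays to their list model
    cases hF1 : lost.foldl (fun g? val => g?.bind fun gg => adjustAt gg val (-1))
        (some (Array.replicate n.toNat (1 : Int))) with
    | none =>
      exfalso
      have := foldl_adjust_eq (-1) lost (Array.replicate n.toNat 1)
      rw [hF1, hA0, e1] at this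
      simp at this
    | some a1 =>
    have ha1 : a1.toList = g1 := by
      have := foldl_adjust_eq (-1) lost (Array.replicate n.toNat 1)
      rw [hF1, hA0, e1] at this
      exact Option.some.inj this
    cases hF2 : reserve.foldl (fun g? val => g?.bind fun gg => adjustAt gg val 1) (some a1) with
    | none =>
      exfalso
      have := foldl_adjust_eq 1 reserve a1
      rw [hF2, ha1, e2] at this
      simp at this
    | some a2 =>
    have ha2 : a2.toList = g2 := by
      have := foldl_adjust_eq 1 reserve a1
      rw [hF2, ha1, e2] at this
      exact Option.some.inj this
    simp only [Option.bind_some]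
    have hsz : a2.size = g2.length := by rw [← ha2, Array.length_toList]
    have hlen2 : g2.length = n.toNat := by rw [l2, l1, hlen0]
    -- the cell values after the (shared) setup loops
    have hval2 : ∀ i : Nat, i < g2.length → g2.getD i 0 = 1
        + (reserve.countP (fun v => PySem.Int.mod (v - 1) n = (i : Int)))
        - (lost.countP (fun v => PySem.Int.mod (v - 1) n = (i : Int))) := by
      intro i hi
      have hi1 : i < g1.length := by omega
      have hi0 : i < n.toNat := by omega
      have hb1 : ((List.replicate n.toNat (1 : Int)).length : Int) = n := by rw [hlen0]; exact hcast
      have hb2 : ((g1.length : Nat) : Int) = n := by rw [l1, hlen0]; exact hcast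
      rw [p2 i hi1, p1 i (by rw [hlen0]; exact hi0), getD_replicate_one n.toNat i hi0,
        hb1, hb2]
      ring
    obtain ⟨g', ego, hfold⟩ := scan_sim g2.length g2 0 g2 n 0 0 false
      (by omega)
      rfl
      (by rw [hlen2]; exact hcast.symm)
      (by
        intro i _ _
        rw [if_neg (by simp)])
      (fun h => absurd h (by omega))
      (by simp)
      (by
        intro _ hl1 hc
        have hn2 : n = 1 := by omega
        rw [hval2 0 (by omega)] at hc
        have hallL : lost.countP (fun v => PySem.Int.mod (v - 1) n = ((0 : Nat) : Int)) =
            lost.length := by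
          rw [List.countP_eq_length]
          intro v hv
          simp only [decide_eq_true_eq]
          rw [PySem.Int.mod_eq_emod_of_pos (by omega), hn2]
          have := hlr v hv
          omega
        have hallR : reserve.countP (fun v => PySem.Int.mod (v - 1) n = ((0 : Nat) : Int)) =
            reserve.length := by
          rw [List.countP_eq_length]
          intro v hv
          simp only [decide_eq_true_eq]
          rw [PySem.Int.mod_eq_emod_of_pos (by omega), hn2]
          have := hrr v hv
          omega
        rw [hallL, hallR] at hc
        exact hcr ⟨hn2, by omega⟩)
    -- carry A's scan from the array to the list model
    cases hS : scanA a2.size a2 0 with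
    | none =>
      exfalso
      have := scan_eq a2.size a2 0
      rw [hS, ha2, hsz, ego] at this
      simp at this
    | some G' =>
    have hG' : G'.toList = g' := by
      have := scan_eq a2.size a2 0
      rw [hS, ha2, hsz, ego] at this
      exact Option.some.inj this
    show (PySem.List.count G'.toList 1 : Int) + (PySem.List.count G'.toList 2 : Int) = _
    rw [bStep_eq, ha2, hG', PySem.List.count_eq, PySem.List.count_eq]
    simp only [Nat.cast_zero] at hfold
    rw [← hfold]
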